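-- pv_equiv track=rewrite | github.com/yu-hui-lin/CyriPanel | caller/cnv_hybrid.py | transform_cnvtag
-- ===== SOURCE A (Python) =====
-- def transform_cnvtag(cnvtag):
--     """
--     Rename some cnv tags for downstream processing.
--     """
--     # --- MODIFIED: Handle edge case where cnvtag is "None" or empty string at function entry,
--     # returning "cn2" as default to prevent downstream errors. ---
--     if not cnvtag:
--         return "cn2"
--     # --- END OF MODIFICATION ---
--
--     split_call = cnvtag.split("_")
--     # exon9hyb_star5 and dup_star13 are unlikely to occur together with yet another sv.
--     if cnvtag != "exon9hyb_star5":
--         while "exon9hyb" in split_call and "star5" in split_call: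
--             split_call.remove("exon9hyb")
--             split_call.remove("star5")
--     if cnvtag != "dup_star13":
--         while "dup" in split_call and "star13" in split_call:
--             split_call.remove("dup")
--             split_call.remove("star13")
--
--     # --- MODIFIED: Handle cases where simplification logic removes all CNV events.
--     # When paired events (dup/star13 or exon9hyb/star5) cancel each other out, the list becomes empty.
--     # Return "cn2" to correctly represent normal diploid copy number after all events balance out. ---
--     if not split_call:
--         return "cn2"
--     # --- END OF MODIFICATION ---
--
--     if split_call.count("dup") == len(split_call):
--         return "cn" + str(len(split_call) + 2)
--     if cnvtag == "dup_dup_exon9hyb_star13intron1":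
--         return "cn4"
--
--     # --- MODIFIED: Re-sort split_call after simplification to ensure consistent ordering of CNV tags
--     # for downstream processing and comparison. ---
--     return "_".join(sorted(split_call))
-- ===== SOURCE B (Python) =====
-- def transform_cnvtag(cnvtag):
--     """
--     Rename some cnv tags for downstream processing.
--     """
--     if not cnvtag:
--         return "cn2"
--     counts = {}
--     for tok in cnvtag.split("_"):
--         counts[tok] = counts.get(tok, 0) + 1
--     if cnvtag != "exon9hyb_star5":
--         n = min(counts.get("exon9hyb", 0), counts.get("star5", 0))
--         if n:
--             counts["exon9hyb"] -= n
--             counts["star5"] -= n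
--     if cnvtag != "dup_star13":
--         n = min(counts.get("dup", 0), counts.get("star13", 0))
--         if n:
--             counts["dup"] -= n
--             counts["star13"] -= n
--     total = sum(counts.values())
--     if total == 0:
--         return "cn2"
--     if counts.get("dup", 0) == total:
--         return "cn" + str(total + 2)
--     if cnvtag == "dup_dup_exon9hyb_star13intron1":
--         return "cn4"
--     return "_".join(tok for key in sorted(counts) for tok in [key] * counts[key])
-- ===== Notes on version B (the rewrite author's own statement) =====
-- stated objective: simpler
-- what changed: B builds one dictionary of underscore-token counts and cancels each guarded pair (exon9hyb/star5, dup/star13) arithmetically by subtracting min of the two counts, then reads the emptiness/all-dup tests and the sorted output off the counts, instead of A's repeated while-loops that rescan and remove() list elements pair by pair.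
import Mathlib
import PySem

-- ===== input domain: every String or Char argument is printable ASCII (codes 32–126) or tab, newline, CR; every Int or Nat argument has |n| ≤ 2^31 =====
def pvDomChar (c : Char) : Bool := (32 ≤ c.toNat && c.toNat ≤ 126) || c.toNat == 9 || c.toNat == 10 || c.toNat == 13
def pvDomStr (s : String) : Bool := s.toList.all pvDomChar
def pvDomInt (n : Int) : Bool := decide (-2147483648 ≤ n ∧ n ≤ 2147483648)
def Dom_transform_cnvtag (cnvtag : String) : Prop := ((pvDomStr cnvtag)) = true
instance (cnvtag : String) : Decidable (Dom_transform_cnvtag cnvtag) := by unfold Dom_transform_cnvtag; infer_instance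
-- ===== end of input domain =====

-- B replaces A's repeated while/remove pair-cancellation over a token list by one token-count
-- dictionary and arithmetic subtraction of min-counts (objective: simpler; same return value).

-- ===== PORT A =====
-- A's 'while x in split_call and y in split_call: split_call.remove(x); split_call.remove(y)'.
-- Both removals hit a present element (the guard checks membership and x ≠ y at every call site),
-- so list.remove is List.erase exactly (PySem.List.remove?_eq_some_erase).
def pairLoop (x y : String) (l : List String) : List String :=
  if h : x ∈ l ∧ y ∈ l then
    pairLoop x y ((l.erase x).erase y)
  else l
termination_by l.length
decreasing_by
  have h1 := List.length_erase_of_mem h.1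
  have h2 := (List.erase_sublist (l := l.erase x) (a := y)).length_le
  have h3 := List.length_pos_of_mem h.1
  omega

def transform_cnvtag (cnvtag : String) : String :=
  if cnvtag = "" then "cn2"
  else
    -- .split("_"): non-empty separator, the PySem.Chars.splitOn form (exact)
    let split_call := ((PySem.Chars.splitOn cnvtag.toList ['_']).map String.ofList)
    let split_call := if cnvtag ≠ "exon9hyb_star5" then pairLoop "exon9hyb" "star5" split_call else split_call
    let split_call := if cnvtag ≠ "dup_star13" then pairLoop "dup" "star13" split_call else split_call
    if split_call = [] then "cn2"
    else if PySem.List.count split_call "dup" = split_call.length then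
      "cn" ++ PySem.Int.toStr ((split_call.length : Int) + 2)
    else if cnvtag = "dup_dup_exon9hyb_star13intron1" then "cn4"
    else PySem.Str.join "_" (PySem.List.sorted split_call (fun x => x) false)

-- ===== PORT B =====
-- the guarded body 'n = min(...); if n: counts[x] -= n; counts[y] -= n' of Source B
-- ('counts[x] -= n' only runs when n ≠ 0, so both keys are present: modify with default 0 is exact)
def cancelPair (x y : String) (counts : PySem.Dict String Int) : PySem.Dict String Int :=
  let n := min (counts.getD x 0) (counts.getD y 0)
  if n ≠ 0 then (counts.modify x 0 (· - n)).modify y 0 (· - n) else counts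

def transform_cnvtag_alt (cnvtag : String) : String :=
  if cnvtag = "" then "cn2"
  else
    let counts := (((PySem.Chars.splitOn cnvtag.toList ['_']).map String.ofList)).foldl
      (fun d t => d.insert t (d.getD t 0 + 1)) PySem.Dict.empty
    let counts := if cnvtag ≠ "exon9hyb_star5" then cancelPair "exon9hyb" "star5" counts else counts
    let counts := if cnvtag ≠ "dup_star13" then cancelPair "dup" "star13" counts else counts
    let total := counts.values.sum
    if total = 0 then "cn2"
    else if counts.getD "dup" 0 = total then "cn" ++ PySem.Int.toStr (total + 2)
    else if cnvtag = "dup_dup_exon9hyb_star13intron1" then "cn4"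
    else
      -- '_'.join(tok for key in sorted(counts) for tok in [key] * counts[key]); counts are ≥ 0
      PySem.Str.join "_" ((PySem.List.sorted counts.keys (fun x => x) false).flatMap
        (fun k => List.replicate (counts.getD k 0).toNat k))

-- ===== PRECONDITION & SPEC =====
def Spec_transform_cnvtag (cnvtag : String) (out : String) : Prop := out = transform_cnvtag_alt cnvtag
instance (cnvtag : String) (out : String) : Decidable (Spec_transform_cnvtag cnvtag out) := by unfold Spec_transform_cnvtag; infer_instance

-- ===== CLAIM (what is proved, stated in full; the proofs are below) =====
def Claim_equal_transform_cnvtag : Prop := ∀ (cnvtag : String), Dom_transform_cnvtag cnvtag → Spec_transform_cnvtag cnvtag (transform_cnvtag cnvtag)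

-- ===== LEMMAS AND PROOFS =====

theorem pairLoop_count (x y : String) (hxy : x ≠ y) (l : List String) (v : String) :
    (pairLoop x y l).count v =
      l.count v - (if v = x ∨ v = y then min (l.count x) (l.count y) else 0) := by
  fun_induction pairLoop x y l with
  | case1 l h ih =>
    have hx : 0 < l.count x := List.count_pos_iff.mpr h.1
    have hy : 0 < l.count y := List.count_pos_iff.mpr h.2
    have cx : ((l.erase x).erase y).count x = l.count x - 1 := by
      rw [List.count_erase_of_ne hxy, List.count_erase_self]
    have cy : ((l.erase x).erase y).count y = l.count y - 1 := by
      rw [List.count_erase_self, List.count_erase_of_ne (Ne.symm hxy)]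
    rw [ih]
    by_cases hv : v = x ∨ v = y
    · have cv : ((l.erase x).erase y).count v = l.count v - 1 := by
        rcases hv with rfl | rfl
        exacts [cx, cy]
      simp only [cv, cx, cy, if_pos hv]
      omega
    · have cv : ((l.erase x).erase y).count v = l.count v := by
        rw [List.count_erase_of_ne (by rintro rfl; exact hv (Or.inr rfl)),
            List.count_erase_of_ne (by rintro rfl; exact hv (Or.inl rfl))]
      simp only [cv, if_neg hv]
  | case2 l h =>
    have hmin : min (l.count x) (l.count y) = 0 := by
      rcases not_and_or.mp h with h' | h' <;>
        simp [List.count_eq_zero.mpr h']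
    simp [hmin]

theorem pairLoop_subset (x y : String) (hxy : x ≠ y) (l : List String) (v : String)
    (hv : v ∈ pairLoop x y l) : v ∈ l := by
  have h := pairLoop_count x y hxy l v
  have h1 : 0 < (pairLoop x y l).count v := List.count_pos_iff.mpr hv
  have : 0 < l.count v := by by_cases hc : v = x ∨ v = y <;> simp [hc] at h <;> omega
  exact List.count_pos_iff.mp this

theorem cancel_getD (x y : String) (hxy : x ≠ y) (d : PySem.Dict String Int) (m : List String)
    (hc : ∀ v, d.getD v 0 = (m.count v : Int)) (v : String) :
    (cancelPair x y d).getD v 0 = ((pairLoop x y m).count v : Int) := by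
  have hmin : min (d.getD x 0) (d.getD y 0) = ((min (m.count x) (m.count y) : Nat) : Int) := by
    rw [hc, hc]; push_cast; rfl
  have hcnt := pairLoop_count x y hxy m v
  unfold cancelPair
  simp only [hmin]
  by_cases hz : ((min (m.count x) (m.count y) : Nat) : Int) ≠ 0
  · have hmn : 0 < min (m.count x) (m.count y) := by omega
    simp only [if_pos hz, PySem.Dict.getD_modify, hc, hcnt]
    have hxle : min (m.count x) (m.count y) ≤ m.count x := Nat.min_le_left _ _
    have hyle : min (m.count x) (m.count y) ≤ m.count y := Nat.min_le_right _ _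
    have hmn : 0 < min (m.count x) (m.count y) := by omega
    split_ifs
    all_goals (try subst_vars)
    all_goals (try tauto)
    all_goals omega
  · simp only [if_neg hz, hc, hcnt]
    have : min (m.count x) (m.count y) = 0 := by omega
    simp [this]


theorem cancel_keys (x y : String) (d : PySem.Dict String Int) (m : List String)
    (hc : ∀ v, d.getD v 0 = (m.count v : Int)) (hkm : ∀ v, v ∈ m → v ∈ d.keys) :
    (cancelPair x y d).keys = d.keys := by
  unfold cancelPair
  by_cases hz : min (d.getD x 0) (d.getD y 0) ≠ 0
  · have hx : x ∈ m := by
      have := hc x; have := hc y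
      have : 0 < m.count x := by omega
      exact List.count_pos_iff.mp this
    have hy : y ∈ m := by
      have := hc x; have := hc y
      have : 0 < m.count y := by omega
      exact List.count_pos_iff.mp this
    have hcx : d.contains x = true := (PySem.Dict.contains_iff_mem_keys _ _).mpr (hkm x hx)
    have hcy : d.contains y = true := (PySem.Dict.contains_iff_mem_keys _ _).mpr (hkm y hy)
    rw [if_pos hz, PySem.Dict.keys_modify, PySem.Dict.keys_insert_of_contains,
        PySem.Dict.keys_modify, PySem.Dict.keys_insert_of_contains]
    · exact hcx
    · rw [PySem.Dict.contains_modify]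
      simp [hcy]
  · rw [if_neg hz]

theorem sum_ite_one (a : String) (ks : List String) (hnd : ks.Nodup) (ha : a ∈ ks) :
    (ks.map fun k => if a = k then (1:Int) else 0).sum = 1 := by
  induction ks with
  | nil => cases ha
  | cons b t ih =>
    rcases List.nodup_cons.mp hnd with ⟨hb, hnd'⟩
    rw [List.map_cons, List.sum_cons]
    by_cases hab : a = b
    · subst hab
      have h0 : (t.map fun k => if a = k then (1:Int) else 0).sum = 0 :=
        List.sum_eq_zero (by
          intro x hx
          rcases List.mem_map.mp hx with ⟨k, hk, rfl⟩
          have hak : a ≠ k := fun h => hb (h ▸ hk)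
          simp [hak])
      simp [h0]
    · rw [if_neg hab, ih hnd' ((List.mem_cons.mp ha).resolve_left hab)]
      ring

theorem sum_count_int (ks L : List String) (hnd : ks.Nodup) (hsub : ∀ v ∈ L, v ∈ ks) :
    (ks.map fun k => (L.count k : Int)).sum = (L.length : Int) := by
  induction L with
  | nil => simp
  | cons a L ih =>
    have ha : a ∈ ks := hsub a (List.mem_cons_self ..)
    have hmap : (ks.map fun k => ((a :: L).count k : Int))
        = ks.map fun k => (L.count k : Int) + (if a = k then 1 else 0) := by
      apply List.map_congr_left
      intro k _
      rw [List.count_cons]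
      push_cast
      by_cases h : a = k
      · subst h; simp
      · simp [h]
    rw [hmap, PySem.List.sum_map_add_int, sum_ite_one a ks hnd ha,
        ih (fun v hv => hsub v (List.mem_cons_of_mem _ hv))]
    push_cast [List.length_cons]
    ring

theorem count_flat (sk L : List String) (hnd : sk.Nodup) (a : String) :
    (sk.flatMap fun k => List.replicate (L.count k) k).count a
      = if a ∈ sk then L.count a else 0 := by
  induction sk with
  | nil => simp
  | cons k sk ih =>
    rcases List.nodup_cons.mp hnd with ⟨hk, hnd'⟩
    rw [List.flatMap_cons, List.count_append, List.count_replicate, ih hnd']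
    by_cases hak : a = k
    · subst hak
      simp [hk]
    · simp [Ne.symm hak, hak]

theorem pairwise_flat (sk : List String) (n : String → Nat) (hp : sk.Pairwise (· ≤ ·)) :
    (sk.flatMap fun k => List.replicate (n k) k).Pairwise (· ≤ ·) := by
  induction sk with
  | nil => simp
  | cons k sk ih =>
    rcases List.pairwise_cons.mp hp with ⟨hk, hp'⟩
    rw [List.flatMap_cons]
    rw [List.pairwise_append]
    refine ⟨List.pairwise_replicate_of_refl, ih hp', ?_⟩
    intro a ha b hb
    rw [List.eq_of_mem_replicate ha]
    rcases List.mem_flatMap.mp hb with ⟨k', hk', hbk'⟩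
    rw [List.eq_of_mem_replicate hbk']
    exact hk k' hk'

theorem sorted_flat (ks L : List String) (hnd : ks.Nodup) (hsub : ∀ v ∈ L, v ∈ ks) :
    PySem.List.sorted L (fun x => x) false
      = (PySem.List.sorted ks (fun x => x) false).flatMap
          (fun k => List.replicate (L.count k) k) := by
  have hperm : (PySem.List.sorted ks (fun x => x) false).Perm ks := PySem.List.sorted_perm ..
  have hnd' : (PySem.List.sorted ks (fun x => x) false).Nodup := hperm.nodup_iff.mpr hnd
  apply PySem.List.sorted_id_eq_of_perm_of_pairwise
  · apply List.perm_iff_count.mpr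
    intro a
    rw [count_flat _ _ hnd']
    by_cases ha : a ∈ ks
    · simp [hperm.mem_iff.mpr ha]
    · have : L.count a = 0 := List.count_eq_zero.mpr (fun h => ha (hsub a h))
      simp [this, fun h => ha (hperm.mem_iff.mp h)]
  · exact pairwise_flat _ _ (PySem.List.sorted_pairwise ..)

theorem stage (c : Prop) [Decidable c] (x y : String) (hxy : x ≠ y)
    (d : PySem.Dict String Int) (m base : List String)
    (hc : ∀ v, d.getD v 0 = (m.count v : Int)) (hk : d.keys = PySem.Set.ofList base)
    (hsb : ∀ v ∈ m, v ∈ base) :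
    (∀ v, (if c then cancelPair x y d else d).getD v 0
        = ((if c then pairLoop x y m else m).count v : Int))
    ∧ (if c then cancelPair x y d else d).keys = PySem.Set.ofList base
    ∧ (∀ v ∈ (if c then pairLoop x y m else m), v ∈ base) := by
  by_cases h : c
  · simp only [if_pos h]
    refine ⟨cancel_getD x y hxy d m hc, ?_, fun v hv => hsb v (pairLoop_subset x y hxy m v hv)⟩
    rw [cancel_keys x y d m hc
      (fun v hv => by rw [hk]; exact (PySem.Set.mem_ofList ..).mpr (hsb v hv)), hk]
  · simp only [if_neg h]
    exact ⟨hc, hk, hsb⟩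

-- the common tail of the two ports, from the simplified token data onwards
theorem final_eq (s : String) (base L : List String) (d : PySem.Dict String Int)
    (hc : ∀ v, d.getD v 0 = (L.count v : Int)) (hk : d.keys = PySem.Set.ofList base)
    (hsb : ∀ v ∈ L, v ∈ base) :
    (if L = [] then "cn2"
     else if PySem.List.count L "dup" = L.length then
       "cn" ++ PySem.Int.toStr ((L.length : Int) + 2)
     else if s = "dup_dup_exon9hyb_star13intron1" then "cn4"
     else PySem.Str.join "_" (PySem.List.sorted L (fun x => x) false))
    = (if d.values.sum = 0 then "cn2"
       else if d.getD "dup" 0 = d.values.sum then "cn" ++ PySem.Int.toStr (d.values.sum + 2)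
       else if s = "dup_dup_exon9hyb_star13intron1" then "cn4"
       else PySem.Str.join "_" ((PySem.List.sorted d.keys (fun x => x) false).flatMap
          (fun k => List.replicate (d.getD k 0).toNat k))) := by
  have hknd : d.keys.Nodup := by rw [hk]; exact PySem.Set.nodup_ofList base
  have hsubk : ∀ v ∈ L, v ∈ d.keys := fun v hv => by
    rw [hk]; exact (PySem.Set.mem_ofList ..).mpr (hsb v hv)
  have htot : d.values.sum = (L.length : Int) := by
    rw [PySem.Dict.values_eq_map_keys d hknd 0,
        List.map_congr_left (fun k _ => hc k), sum_count_int d.keys L hknd hsubk]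
  have e1 : (((L.length : Int)) = 0) = (L = []) := by
    apply propext
    constructor
    · intro h
      have : L.length = 0 := by exact_mod_cast h
      exact List.length_eq_zero_iff.mp this
    · rintro rfl; simp
  have e2 : (d.getD "dup" 0 = ((L.length : Int))) = (PySem.List.count L "dup" = L.length) := by
    rw [hc, PySem.List.count_eq]
    apply propext
    exact ⟨fun h => by exact_mod_cast h, fun h => by exact_mod_cast h⟩
  have e4 : PySem.List.sorted L (fun x => x) false
      = (PySem.List.sorted d.keys (fun x => x) false).flatMap
          (fun k => List.replicate (d.getD k 0).toNat k) := by
    rw [sorted_flat d.keys L hknd hsubk]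
    have hfun : (fun k => List.replicate (L.count k) k)
        = (fun k => List.replicate ((d.getD k 0).toNat) k) := by
      funext k
      rw [hc k]
      simp
    rw [hfun]
  simp only [htot, e1, e2, ← e4]

-- ===== VERDICT (by name: the statement is the Claim_ definition above) =====
theorem transform_cnvtag_spec : Claim_equal_transform_cnvtag := by
  intro s _
  unfold Spec_transform_cnvtag
  by_cases hs : s = ""
  · simp [transform_cnvtag, transform_cnvtag_alt, hs]
  · simp only [transform_cnvtag, transform_cnvtag_alt, if_neg hs]
    have hd0c : ∀ v, ((((PySem.Chars.splitOn s.toList ['_']).map String.ofList)).foldl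
        (fun d t => d.insert t (d.getD t 0 + 1))
        (PySem.Dict.empty : PySem.Dict String Int)).getD v 0
        = ((((PySem.Chars.splitOn s.toList ['_']).map String.ofList)).count v : Int) := by
      intro v
      rw [PySem.Dict.getD_foldl_insert_add_one]
      simp [PySem.Dict.getD_empty]
    have hd0k : ((((PySem.Chars.splitOn s.toList ['_']).map String.ofList)).foldl
        (fun d t => d.insert t (d.getD t 0 + 1))
        (PySem.Dict.empty : PySem.Dict String Int)).keys
        = PySem.Set.ofList (((PySem.Chars.splitOn s.toList ['_']).map String.ofList)) := by
      rw [PySem.Dict.keys_foldl_insert]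
      simp only [PySem.Dict.keys_empty]
      exact PySem.Set.update_nil_left _
    obtain ⟨h1c, h1k, h1s⟩ := stage (s ≠ "exon9hyb_star5") "exon9hyb" "star5" (by decide)
      _ _ _ hd0c hd0k (fun v hv => hv)
    obtain ⟨h2c, h2k, h2s⟩ := stage (s ≠ "dup_star13") "dup" "star13" (by decide)
      _ _ _ h1c h1k h1s
    exact final_eq s _ _ _ h2c h2k h2s
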